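-- pv_equiv track=rewrite | github.com/danieldeutsch/repro | repro/common/util.py | insert_empty_values
-- ===== SOURCE A (Python) =====
-- from typing import Any, Dict, List, Set, T, Tuple, Union
--
-- def insert_empty_values(
--     inputs: List[T], empty_indices: Set[int], empty_value: T
-- ) -> List[T]:
--     with_empty = []
--     num = len(inputs) + len(empty_indices)
--
--     if len(empty_indices) > 0:
--         max_empty_index = max(empty_indices)
--         if max_empty_index >= num:
--             raise Exception(
--                 f"Found invalid empty index. Found {max_empty_index} for length {num}"
--             )
--
--     index = 0
--     for i in range(num):
--         if i in empty_indices: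
--             with_empty.append(empty_value)
--         else:
--             with_empty.append(inputs[index])
--             index += 1
--     return with_empty
-- ===== SOURCE B (Python) =====
-- def insert_empty_values(inputs, empty_indices, empty_value):
--     num = len(inputs) + len(empty_indices)
--
--     if len(empty_indices) > 0:
--         max_empty_index = max(empty_indices)
--         if max_empty_index >= num:
--             raise Exception(
--                 f"Found invalid empty index. Found {max_empty_index} for length {num}"
--             )
--
--     result = list(inputs)
--     for idx in sorted(empty_indices):
--         result.insert(idx, empty_value)
--     return result
-- ===== Notes on version B (the rewrite author's own statement) =====
-- stated objective: alternative
-- what changed: Instead of scanning every output position 0..num-1 with a per-position set-membership test and a read pointer into inputs, B copies the inputs and splices the empty value in with list.insert at each empty index taken in ascending sorted order.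
import Mathlib
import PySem

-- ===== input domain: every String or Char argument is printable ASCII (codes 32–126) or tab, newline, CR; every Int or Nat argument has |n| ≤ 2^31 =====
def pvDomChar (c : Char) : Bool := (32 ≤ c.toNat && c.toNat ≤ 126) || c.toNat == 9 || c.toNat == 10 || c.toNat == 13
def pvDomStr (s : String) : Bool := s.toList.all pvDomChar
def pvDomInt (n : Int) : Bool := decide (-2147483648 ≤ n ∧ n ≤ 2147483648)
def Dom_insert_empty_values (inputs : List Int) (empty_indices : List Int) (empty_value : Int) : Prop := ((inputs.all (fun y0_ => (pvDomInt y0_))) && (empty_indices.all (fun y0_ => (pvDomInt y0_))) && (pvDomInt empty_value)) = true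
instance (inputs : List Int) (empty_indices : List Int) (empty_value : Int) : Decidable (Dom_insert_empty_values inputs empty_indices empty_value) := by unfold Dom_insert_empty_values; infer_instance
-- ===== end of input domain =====

-- B replaces A's scan over every output position (with a membership test per position)
-- by splicing the empty value into a copy of `inputs` at each index in ascending order;
-- objective: alternative decomposition. Equivalence of return values on Pre_ (A raises outside it).


-- ===== PORT A =====
-- A raises an Exception when the guard fires and an IndexError when `inputs[index]`
-- runs out of range (a negative empty index); both are excluded by Pre_, the port
-- returns [] / a default 0 there.
def insert_empty_values (inputs : List Int) (empty_indices : List Int) (empty_value : Int) : List Int :=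
  let num : Int := inputs.length + empty_indices.length
  if 0 < empty_indices.length ∧ num ≤ (PySem.List.max? empty_indices (fun y => y)).getD 0 then
    []  -- `raise Exception(...)`; excluded by Pre_
  else
    ((PySem.List.pyRange 0 num 1).foldl
      (fun (st : List Int × Int) (i : Int) =>
        if i ∈ empty_indices then (st.1 ++ [empty_value], st.2)
        else (st.1 ++ [PySem.List.pyGetD inputs st.2 0], st.2 + 1))
      ([], 0)).1

-- ===== PORT B =====
def insert_empty_values_alt (inputs : List Int) (empty_indices : List Int) (empty_value : Int) : List Int :=
  let num : Int := inputs.length + empty_indices.length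
  if 0 < empty_indices.length ∧ num ≤ (PySem.List.max? empty_indices (fun y => y)).getD 0 then
    []  -- `raise Exception(...)`; excluded by Pre_
  else
    (PySem.List.sorted empty_indices (fun y => y) false).foldl
      (fun r idx => PySem.List.insert r idx empty_value) inputs

-- ===== PRECONDITION & SPEC =====
-- Pre_ excludes exactly the inputs where A raises: an index ≥ num (explicit Exception)
-- or a negative index (IndexError); empty_indices is a Python set, hence Nodup.
def Pre_insert_empty_values (inputs : List Int) (empty_indices : List Int) (empty_value : Int) : Prop :=
  empty_indices.Nodup ∧
  ∀ x ∈ empty_indices, 0 ≤ x ∧ x < (inputs.length : Int) + empty_indices.length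
instance (inputs : List Int) (empty_indices : List Int) (empty_value : Int) : Decidable (Pre_insert_empty_values inputs empty_indices empty_value) := by unfold Pre_insert_empty_values; infer_instance

def pvWitness_insert_empty_values : List Int × List Int × Int := ([10, 20, 30], [1, 4], 0)

def Spec_insert_empty_values (inputs : List Int) (empty_indices : List Int) (empty_value : Int) (out : List Int) : Prop := out = insert_empty_values_alt inputs empty_indices empty_value
instance (inputs : List Int) (empty_indices : List Int) (empty_value : Int) (out : List Int) : Decidable (Spec_insert_empty_values inputs empty_indices empty_value out) := by unfold Spec_insert_empty_values; infer_instance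

-- ===== CLAIM (what is proved, stated in full; the proofs are below) =====
def Claim_equal_insert_empty_values : Prop := ∀ (inputs : List Int) (empty_indices : List Int) (empty_value : Int), Dom_insert_empty_values inputs empty_indices empty_value → Pre_insert_empty_values inputs empty_indices empty_value → Spec_insert_empty_values inputs empty_indices empty_value (insert_empty_values inputs empty_indices empty_value)


-- ===== LEMMAS AND PROOFS =====

-- proof-only model of A's loop: fuel-indexed, current output position i, read pointer index
def buildA (S inputs : List Int) (v : Int) : Nat → Int → Int → List Int
  | 0, _, _ => []
  | f + 1, i, index =>
    if i ∈ S then v :: buildA S inputs v f (i + 1) index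
    else PySem.List.pyGetD inputs index 0 :: buildA S inputs v f (i + 1) (index + 1)

-- pure copy phase (no empty index at or after i)
def copyA (inputs : List Int) : Nat → Int → List Int
  | 0, _ => []
  | f + 1, index => PySem.List.pyGetD inputs index 0 :: copyA inputs f (index + 1)

lemma buildA_congr (S T inputs : List Int) (v : Int)
    (h : ∀ x : Int, x ∈ S ↔ x ∈ T) :
    ∀ (f : Nat) (i index : Int), buildA S inputs v f i index = buildA T inputs v f i index := by
  intro f
  induction f with
  | zero => intro i index; rfl
  | succ f ih =>
    intro i index
    simp only [buildA]
    by_cases hm : i ∈ S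
    · rw [if_pos hm, if_pos ((h i).mp hm), ih]
    · rw [if_neg hm, if_neg (fun hc => hm ((h i).mpr hc)), ih]

lemma buildA_noMem (S inputs : List Int) (v : Int) :
    ∀ (f : Nat) (i index : Int), (∀ x ∈ S, x < i) →
      buildA S inputs v f i index = copyA inputs f index := by
  intro f
  induction f with
  | zero => intro i index _; rfl
  | succ f ih =>
    intro i index h
    simp only [buildA, copyA]
    rw [if_neg (fun hc => absurd (h i hc) (lt_irrefl i)), ih (i + 1) (index + 1)
      (fun x hx => lt_trans (h x hx) (by omega))]

lemma copyA_eq (inputs : List Int) :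
    ∀ (f idx : Nat), idx + f ≤ inputs.length →
      copyA inputs f (idx : Int) = (inputs.drop idx).take f := by
  intro f
  induction f with
  | zero => intro idx _; simp [copyA]
  | succ f ih =>
    intro idx h
    have hidx : idx < inputs.length := by omega
    have hdrop : inputs.drop idx = inputs[idx] :: inputs.drop (idx + 1) :=
      (List.getElem_cons_drop hidx).symm
    simp only [copyA, hdrop, List.take_succ_cons]
    rw [PySem.List.pyGetD_natCast]
    have ht := ih (idx + 1) (by omega)
    push_cast at ht
    rw [ht]
    simp [List.getD, hidx]

lemma buildA_succ (S inputs : List Int) (v : Int) (f : Nat) (i index : Int) :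
    buildA S inputs v (f + 1) i index =
      if i ∈ S then v :: buildA S inputs v f (i + 1) index
      else PySem.List.pyGetD inputs index 0 :: buildA S inputs v f (i + 1) (index + 1) := rfl

lemma buildA_splice (S' inputs : List Int) (m v : Int) (hlt : ∀ x ∈ S', x < m) :
    ∀ (d : Nat) (extra : Nat) (i index : Int), i + d = m →
      buildA (S' ++ [m]) inputs v (d + 1 + extra) i index =
        (buildA S' inputs v (d + extra) i index).take d ++
          v :: (buildA S' inputs v (d + extra) i index).drop d := by
  intro d
  induction d with
  | zero =>
    intro extra i index hi
    have him : i = m := by omega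
    subst him
    simp only [List.take_zero, List.drop_zero, List.nil_append]
    rw [show 0 + 1 + extra = extra + 1 from by omega, buildA_succ, if_pos (by simp)]
    rw [show 0 + extra = extra from by omega]
    rw [buildA_noMem (S' ++ [i]) inputs v extra (i + 1) index
      (by intro x hx; rcases List.mem_append.mp hx with h | h
          · exact lt_trans (hlt x h) (by omega)
          · simp at h; omega),
      buildA_noMem S' inputs v extra i index hlt]
  | succ d ih =>
    intro extra i index hi
    have him : i < m := by omega
    have hmem : i ∈ S' ++ [m] ↔ i ∈ S' := by
      simp [List.mem_append]; omega
    rw [show d + 1 + 1 + extra = (d + 1 + extra) + 1 from by omega, buildA_succ]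
    have hih : i + 1 + (d : Int) = m := by push_cast at hi ⊢; omega
    by_cases hc : i ∈ S'
    · rw [if_pos (hmem.mpr hc), ih extra (i + 1) index hih]
      rw [show d + 1 + extra = (d + extra) + 1 from by omega, buildA_succ, if_pos hc]
      simp [List.take_succ_cons, List.drop_succ_cons]
    · rw [if_neg (fun hx => hc (hmem.mp hx)), ih extra (i + 1) (index + 1) hih]
      rw [show d + 1 + extra = (d + extra) + 1 from by omega, buildA_succ, if_neg hc]
      simp [List.take_succ_cons, List.drop_succ_cons]

lemma buildA_length (S inputs : List Int) (v : Int) :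
    ∀ (f : Nat) (i index : Int), (buildA S inputs v f i index).length = f := by
  intro f
  induction f with
  | zero => intro i index; rfl
  | succ f ih =>
    intro i index
    simp only [buildA]
    by_cases hc : i ∈ S
    · rw [if_pos hc]; simp [ih]
    · rw [if_neg hc]; simp [ih]

-- A's loop over range(num) equals buildA
lemma foldl_eq_buildA (S inputs : List Int) (v : Int) :
    ∀ (f : Nat) (i index : Int) (acc : List Int),
      ((PySem.List.pyRange i (i + f) 1).foldl
        (fun (st : List Int × Int) (j : Int) =>
          if j ∈ S then (st.1 ++ [v], st.2)
          else (st.1 ++ [PySem.List.pyGetD inputs st.2 0], st.2 + 1))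
        (acc, index)).1 = acc ++ buildA S inputs v f i index := by
  intro f
  induction f with
  | zero =>
    intro i index acc
    rw [show i + ((0 : Nat) : Int) = i by omega, PySem.List.pyRange_one_eq_nil (le_refl i)]
    simp [buildA]
  | succ f ih =>
    intro i index acc
    rw [PySem.List.pyRange_one_cons (by omega : i < i + ((f + 1 : Nat) : Int))]
    rw [show i + ((f + 1 : Nat) : Int) = (i + 1) + ((f : Nat) : Int) by push_cast; omega]
    simp only [List.foldl_cons, buildA]
    by_cases hc : i ∈ S
    · rw [if_pos hc, if_pos hc, ih]
      simp
    · rw [if_neg hc, if_neg hc, ih]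
      simp

-- main induction: for a strictly increasing in-bounds index list, A's scan = B's splices
lemma buildA_eq_foldl_insert (inputs : List Int) (v : Int) :
    ∀ (L : List Int), L.Pairwise (· < ·) →
      (∀ x ∈ L, 0 ≤ x ∧ x < (inputs.length : Int) + L.length) →
      buildA L inputs v (inputs.length + L.length) 0 0 =
        L.foldl (fun r idx => PySem.List.insert r idx v) inputs := by
  intro L
  induction L using List.reverseRecOn with
  | nil =>
    intro _ _
    simp only [List.length_nil, Nat.add_zero, List.foldl_nil]
    rw [buildA_noMem [] inputs v inputs.length 0 0 (by simp)]
    have := copyA_eq inputs inputs.length 0 (by omega)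
    simpa using this
  | append_singleton L m ihL =>
    intro hpw hbd
    have hlt : ∀ x ∈ L, x < m := by
      intro x hx
      exact (List.pairwise_append.mp hpw).2.2 x hx m (by simp)
    have hpwL : L.Pairwise (· < ·) := (List.pairwise_append.mp hpw).1
    obtain ⟨hm0, hmub⟩ := hbd m (by simp)
    have hmub' : m ≤ (inputs.length : Int) + L.length := by
      simp at hmub; omega
    have hbdL : ∀ x ∈ L, 0 ≤ x ∧ x < (inputs.length : Int) + L.length := by
      intro x hx
      exact ⟨(hbd x (by simp [hx])).1, lt_of_lt_of_le (hlt x hx) hmub'⟩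
    set d : Nat := m.toNat with hd
    have hmd : (d : Int) = m := Int.toNat_of_nonneg hm0
    have hde : d ≤ inputs.length + L.length := by omega
    have hfuel : inputs.length + (L ++ [m]).length = d + 1 + (inputs.length + L.length - d) := by
      simp; omega
    rw [hfuel, buildA_splice L inputs m v hlt d (inputs.length + L.length - d) 0 0 (by omega)]
    have hfe : d + (inputs.length + L.length - d) = inputs.length + L.length := by omega
    rw [hfe, ihL hpwL hbdL, List.foldl_append]
    simp only [List.foldl_cons, List.foldl_nil]
    have hlen : d ≤ (L.foldl (fun r idx => PySem.List.insert r idx v) inputs).length := by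
      rw [← ihL hpwL hbdL, buildA_length]; omega
    rw [← hmd, PySem.List.insert_natCast _ d v hlen]

lemma sorted_strict (S : List Int) (hnd : S.Nodup) :
    (PySem.List.sorted S (fun y => y) false).Pairwise (· < ·) := by
  have hperm := PySem.List.sorted_perm S (fun y => y) false
  have hnd' : (PySem.List.sorted S (fun y => y) false).Nodup := hperm.nodup_iff.mpr hnd
  have hle := PySem.List.sorted_pairwise S (fun y => y)
  have hne : (PySem.List.sorted S (fun y => y) false).Pairwise (· ≠ ·) := hnd'
  exact (hle.and hne).imp (fun h => lt_of_le_of_ne h.1 h.2)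

-- ===== VERDICT (by name: the statement is the Claim_ definition above) =====
theorem insert_empty_values_spec : Claim_equal_insert_empty_values := by
  intro inputs S v _ hpre
  obtain ⟨hnd, hbd⟩ := hpre
  unfold Spec_insert_empty_values insert_empty_values insert_empty_values_alt
  simp only []
  by_cases hg : 0 < S.length ∧ ((inputs.length : Int) + S.length) ≤ (PySem.List.max? S (fun y => y)).getD 0
  · rw [if_pos hg, if_pos hg]
  · rw [if_neg hg, if_neg hg]
    set L := PySem.List.sorted S (fun y => y) false with hL
    have hperm := PySem.List.sorted_perm S (fun y => y) false
    have hlenL : L.length = S.length := hperm.length_eq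
    have hnum : (inputs.length : Int) + S.length =
        (0 : Int) + ((inputs.length + L.length : Nat) : Int) := by
      push_cast; omega
    rw [hnum, foldl_eq_buildA S inputs v (inputs.length + L.length) 0 0 []]
    rw [List.nil_append, buildA_congr S L inputs v (fun x => (hperm.mem_iff (a := x)).symm)]
    exact buildA_eq_foldl_insert inputs v L (sorted_strict S hnd)
      (fun x hx => by
        have := hbd x (hperm.mem_iff.mp hx)
        rw [hlenL]; exact this)
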